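-- pv_equiv track=rewrite | github.com/polishyankee/python-korki | sprawdzian/zad-1.py | licz_bloki
-- ===== SOURCE A (Python) =====
-- def licz_bloki(liczba_binarna):
--     ile_blokow = 0
--     cyfra_poprzednia = None
--     for cyfra in liczba_binarna:
--         if cyfra != cyfra_poprzednia:
--             ile_blokow += 1
--         cyfra_poprzednia = cyfra
--     return ile_blokow
-- ===== SOURCE B (Python) =====
-- def licz_bloki(liczba_binarna):
--     ile = 0
--     s = liczba_binarna
--     while s:
--         s = s.lstrip(s[0])  # remove the whole leading maximal run
--         ile += 1
--     return ile
-- ===== Notes on version B (the rewrite author's own statement) =====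
-- stated objective: alternative
-- what changed: B counts runs by repeatedly stripping the whole leading maximal run with str.lstrip(s[0]) until the string is empty (one iteration per run), instead of A's per-character scan that tracks the previous character with a None sentinel and increments on each change.
import Mathlib
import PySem

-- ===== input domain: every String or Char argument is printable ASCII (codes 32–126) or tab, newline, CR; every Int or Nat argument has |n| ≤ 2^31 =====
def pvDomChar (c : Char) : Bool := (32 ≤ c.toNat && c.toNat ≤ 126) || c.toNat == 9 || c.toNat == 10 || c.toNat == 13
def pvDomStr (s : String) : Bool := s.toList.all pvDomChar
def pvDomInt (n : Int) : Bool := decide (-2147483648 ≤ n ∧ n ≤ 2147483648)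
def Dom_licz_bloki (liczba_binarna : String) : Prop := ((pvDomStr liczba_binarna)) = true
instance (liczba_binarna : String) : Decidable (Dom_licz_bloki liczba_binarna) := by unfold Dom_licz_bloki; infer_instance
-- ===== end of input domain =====

-- B counts runs by repeatedly stripping the whole leading maximal run (lstrip) instead of A's per-character previous-char state machine; alternative decomposition, same cost.
-- ===== PORT A =====
-- literal port of A: fold carrying (ile_blokow, cyfra_poprzednia); `cyfra != None` modeled by Option inequality
def licz_bloki (liczba_binarna : String) : Int :=
  (liczba_binarna.toList.foldl
    (fun (st : Int × Option Char) cyfra =>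
      (if some cyfra ≠ st.2 then st.1 + 1 else st.1, some cyfra))
    (0, none)).1

-- ===== PORT B =====
-- port of Source B's while loop; s.lstrip(s[0]) on a nonempty s is exactly dropWhile (· == s[0])
def pvStripLoop : List Char → Int → Int
  | [], ile => ile
  | c :: t, ile => pvStripLoop ((c :: t).dropWhile (· == c)) (ile + 1)
  termination_by l _ => l.length
  decreasing_by
    simp only [List.dropWhile, beq_self_eq_true]
    exact Nat.lt_succ_of_le (List.length_dropWhile_le _ _)

def licz_bloki_alt (liczba_binarna : String) : Int :=
  pvStripLoop liczba_binarna.toList 0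

-- ===== PRECONDITION & SPEC =====
def Spec_licz_bloki (liczba_binarna : String) (out : Int) : Prop := out = licz_bloki_alt liczba_binarna
instance (liczba_binarna : String) (out : Int) : Decidable (Spec_licz_bloki liczba_binarna out) := by unfold Spec_licz_bloki; infer_instance

-- ===== CLAIM (what is proved, stated in full; the proofs are below) =====
def Claim_equal_licz_bloki : Prop := ∀ (liczba_binarna : String), Dom_licz_bloki liczba_binarna → Spec_licz_bloki liczba_binarna (licz_bloki liczba_binarna)

-- ===== LEMMAS AND PROOFS =====
-- A's fold, once a previous character exists
def foldA (l : List Char) (st : Int × Option Char) : Int × Option Char :=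
  l.foldl (fun (st : Int × Option Char) cyfra =>
    (if some cyfra ≠ st.2 then st.1 + 1 else st.1, some cyfra)) st

theorem foldA_some (l : List Char) (p : Char) (acc : Int) :
    (foldA l (acc, some p)).1 = pvStripLoop (l.dropWhile (· == p)) acc := by
  induction l generalizing p acc with
  | nil => simp [foldA, pvStripLoop]
  | cons c t ih =>
    by_cases h : c = p
    · subst h
      have : (c :: t).dropWhile (· == c) = t.dropWhile (· == c) := by
        simp [List.dropWhile]
      rw [this, ← ih c acc]
      simp [foldA, List.foldl]
    · have hd : (c :: t).dropWhile (· == p) = c :: t := by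
        simp only [List.dropWhile]
        rw [show (c == p) = false from by simp [h]]
      rw [hd]
      have : (foldA (c :: t) (acc, some p)).1 = (foldA t (acc + 1, some c)).1 := by
        simp only [foldA, List.foldl]
        rw [if_pos (by simpa using h)]
      rw [this, ih c (acc + 1), pvStripLoop]
      have : (c :: t).dropWhile (· == c) = t.dropWhile (· == c) := by
        simp [List.dropWhile]
      rw [this]

-- ===== VERDICT (by name: the statement is the Claim_ definition above) =====
theorem licz_bloki_spec : Claim_equal_licz_bloki := by
  intro s _
  unfold Spec_licz_bloki licz_bloki licz_bloki_alt
  cases h : s.toList with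
  | nil => simp [pvStripLoop]
  | cons c t =>
    simp only [List.foldl]
    rw [if_pos (by simp)]
    have h1 := foldA_some t c (0 + 1)
    simp only [foldA] at h1
    rw [h1, pvStripLoop]
    have : (c :: t).dropWhile (· == c) = t.dropWhile (· == c) := by
      simp [List.dropWhile]
    rw [this]
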